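-- pv_equiv track=rewrite | github.com/Kimheekyo35/coding_test_practice | 251022/2개 이상의 알파벳/more-than-one-alphabet.py | find_chain
-- ===== SOURCE A (Python) =====
-- def find_chain(n):
--     for i in range(len(n)):
--         count = 0
--         for j in range(0,i):
--             if n[j] != n[i]:
--                 count += 1
--             if count == 2:
--                 return True
-- ===== SOURCE B (Python) =====
-- def find_chain(n):
--     count = {}
--     for i, c in enumerate(n):
--         if i - count.get(c, 0) >= 2:
--             return True
--         count[c] = count.get(c, 0) + 1
-- ===== Notes on version B (the rewrite author's own statement) =====
-- stated objective: faster
-- what changed: Replaced the quadratic rescan of the prefix at every position by a single pass with a per-character occurrence counter: position i has >=2 earlier differing characters iff i - count[n[i]] >= 2.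
import Mathlib
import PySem

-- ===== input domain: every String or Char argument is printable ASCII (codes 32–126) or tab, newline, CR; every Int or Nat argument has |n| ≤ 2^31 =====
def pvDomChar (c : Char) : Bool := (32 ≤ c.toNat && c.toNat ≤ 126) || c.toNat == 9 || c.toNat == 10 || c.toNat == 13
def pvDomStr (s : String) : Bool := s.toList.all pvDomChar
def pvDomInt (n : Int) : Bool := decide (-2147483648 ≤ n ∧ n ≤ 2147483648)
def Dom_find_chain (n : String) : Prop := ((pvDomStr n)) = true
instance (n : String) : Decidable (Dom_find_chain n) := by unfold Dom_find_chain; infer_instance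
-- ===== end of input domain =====

-- B replaces A's quadratic rescan of the prefix at every position by a single pass with a
-- per-character occurrence counter (objective: faster).

-- ===== PORT A =====
-- inner loop: for j in range(0, i): …
def find_chain_inner (n : String) (i : Int) : List Int → Int → Option Bool
  | [], _ => none
  | j :: rest, count =>
    let count := if PySem.Str.pyGet? n j ≠ PySem.Str.pyGet? n i then count + 1 else count
    if count = 2 then some true else find_chain_inner n i rest count

-- outer loop: for i in range(len(n)): …
def find_chain_outer (n : String) : List Int → Option Bool
  | [] => none
  | i :: rest =>
    match find_chain_inner n i (PySem.List.pyRange 0 i 1) 0 with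
    | some b => some b
    | none => find_chain_outer n rest

def find_chain (n : String) : Option Bool :=
  find_chain_outer n (PySem.List.pyRange 0 (PySem.Str.len n) 1)

-- ===== PORT B =====
-- single pass: for i, c in enumerate(n): …
def find_chain_alt_loop : List (Int × Char) → PySem.Dict Char Int → Option Bool
  | [], _ => none
  | (i, c) :: rest, count =>
    if 2 ≤ i - PySem.Dict.getD count c 0 then some true
    else find_chain_alt_loop rest (PySem.Dict.insert count c (PySem.Dict.getD count c 0 + 1))

def find_chain_alt (n : String) : Option Bool :=
  find_chain_alt_loop (PySem.List.enumerate n.toList 0) PySem.Dict.empty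

-- ===== PRECONDITION & SPEC =====
def Spec_find_chain (n : String) (out : Option Bool) : Prop := out = find_chain_alt n
instance (n : String) (out : Option Bool) : Decidable (Spec_find_chain n out) := by unfold Spec_find_chain; infer_instance

-- ===== CLAIM (what is proved, stated in full; the proofs are below) =====
def Claim_equal_find_chain : Prop := ∀ (n : String), Dom_find_chain n → Spec_find_chain n (find_chain n)

-- ===== LEMMAS AND PROOFS =====

-- A's inner loop over j ∈ [a, i) returns `some true` iff the running count of characters
-- differing from n[i] reaches 2, i.e. iff count + (#differing in the remaining segment) ≥ 2.
theorem find_chain_inner_spec (n : String) (i : Nat) (hi : i < n.toList.length) :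
    ∀ (m a : Nat) (count : Int), i - a = m → a ≤ i → count < 2 →
      find_chain_inner n (i : Int) (PySem.List.pyRange (a : Int) (i : Int) 1) count =
        if 2 ≤ count + (((n.toList.take i).drop a).countP (fun c => c != n.toList[i]) : Int)
        then some true else none := by
  intro m
  induction m with
  | zero =>
    intro a count hm ha hc
    have hai : a = i := by omega
    subst hai
    rw [PySem.List.pyRange_one_eq_nil (by omega)]
    have hdrop : ((n.toList.take a).drop a) = [] := by
      apply List.drop_eq_nil_of_le
      exact List.length_take_le _ _
    rw [hdrop]
    simp [find_chain_inner]
    omega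
  | succ m ih =>
    intro a count hm ha hc
    have hai : a < i := by omega
    have hsa : PySem.Str.pyGet? n (a : Int) = some n.toList[a] := by
      rw [PySem.Str.pyGet?_natCast, List.getElem?_eq_getElem (show a < n.toList.length by omega)]
    have hsi : PySem.Str.pyGet? n (i : Int) = some n.toList[i] := by
      rw [PySem.Str.pyGet?_natCast, List.getElem?_eq_getElem hi]
    have hcons : ((n.toList.take i).drop a)
        = n.toList[a] :: ((n.toList.take i).drop (a + 1)) := by
      have hlt : a < (n.toList.take i).length := by rw [List.length_take]; omega
      rw [List.drop_eq_getElem_cons hlt]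
      congr 1
      exact List.getElem_take
    have hcast : (a : Int) + 1 = ((a + 1 : Nat) : Int) := by push_cast; ring
    rw [PySem.List.pyRange_one_cons (show (a : Int) < (i : Int) by exact_mod_cast hai), hcons,
      List.countP_cons]
    simp only [find_chain_inner]
    by_cases hd : n.toList[a] = n.toList[i]
    · have c1 : ¬ (PySem.Str.pyGet? n (a : Int) ≠ PySem.Str.pyGet? n (i : Int)) := by
        rw [hsa, hsi]; simp [hd]
      have hb : (n.toList[a] != n.toList[i]) = false := by simp [hd]
      rw [if_neg c1, if_neg (show ¬ count = 2 by omega), hb, hcast,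
        ih (a + 1) count (by omega) (by omega) hc]
      simp
    · have c1 : PySem.Str.pyGet? n (a : Int) ≠ PySem.Str.pyGet? n (i : Int) := by
        rw [hsa, hsi]; simp [hd]
      have hb : (n.toList[a] != n.toList[i]) = true := by simp [hd]
      rw [if_pos c1, hb]
      have hone : (if true = true then (1 : Nat) else 0) = 1 := rfl
      rw [hone, Nat.cast_add, Nat.cast_one]
      by_cases h2 : count + 1 = 2
      · rw [if_pos h2, if_pos (show
          (2 : Int) ≤ count + ((((n.toList.take i).drop (a + 1)).countP (fun c => c != n.toList[i]) : Int) + 1) by omega)]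
      · rw [if_neg h2, hcast, ih (a + 1) (count + 1) (by omega) (by omega) (by omega),
          show count + 1 + ((((n.toList.take i).drop (a + 1)).countP (fun c => c != n.toList[i]) : Int))
            = count + ((((n.toList.take i).drop (a + 1)).countP (fun c => c != n.toList[i]) : Int) + 1) by ring]

-- one step of B's counter update keeps the occurrence-count invariant
theorem counter_invariant_step (d : PySem.Dict Char Int) (s : List Char) (k : Nat)
    (hk : k < s.length) (hd : ∀ c : Char, d.getD c 0 = ((s.take k).count c : Int)) :
    ∀ c : Char, (d.insert s[k] (d.getD s[k] 0 + 1)).getD c 0 = ((s.take (k + 1)).count c : Int) := by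
  intro c
  have ht : s.take (k + 1) = s.take k ++ [s[k]] := by
    rw [List.take_add_one, List.getElem?_eq_getElem hk]; rfl
  rw [PySem.Dict.getD_insert, ht, List.count_append]
  by_cases h : c = s[k]
  · rw [if_pos h, hd, h]
    simp
  · rw [if_neg h, hd]
    have hz : List.count c [s[k]] = 0 := by
      simp [List.count_singleton]
      exact fun e => h e.symm
    rw [hz]
    push_cast; ring

-- number of earlier differing characters = k - number of earlier equal characters
theorem countP_ne_eq_sub (s : List Char) (k : Nat) (hk : k < s.length) :
    ((s.take k).countP (fun c => c != s[k]) : Int) = (k : Int) - ((s.take k).count s[k] : Int) := by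
  have hlen : (s.take k).length = k := by simp [List.length_take]; omega
  have h := List.length_eq_countP_add_countP (p := fun c => c != s[k]) (l := s.take k)
  have hc : (s.take k).count s[k] = (s.take k).countP (fun a => decide ¬((a != s[k]) = true)) := by
    rw [List.count]
    apply List.countP_congr
    intro a _
    simp [bne]
  rw [hc]
  omega

-- synchronized main induction: A's remaining outer loop = B's remaining pass,
-- when the dict holds the occurrence counts of the first k characters
theorem main_sync (n : String) : ∀ (m k : Nat) (d : PySem.Dict Char Int),
    m = n.toList.length - k → k ≤ n.toList.length →
    (∀ c : Char, d.getD c 0 = ((n.toList.take k).count c : Int)) →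
    find_chain_outer n (PySem.List.pyRange (k : Int) (n.toList.length : Int) 1) =
      find_chain_alt_loop (PySem.List.enumerate (n.toList.drop k) (k : Int)) d := by
  intro m
  induction m with
  | zero =>
    intro k d hm hk hd
    have hkl : k = n.toList.length := by omega
    rw [PySem.List.pyRange_one_eq_nil (by omega), List.drop_eq_nil_of_le (by omega)]
    simp [find_chain_outer, find_chain_alt_loop, PySem.List.enumerate]
  | succ m ih =>
    intro k d hm hk hd
    have hkl : k < n.toList.length := by omega
    have hdropk : n.toList.drop k = n.toList[k] :: n.toList.drop (k + 1) :=
      List.drop_eq_getElem_cons hkl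
    rw [PySem.List.pyRange_one_cons (by exact_mod_cast hkl), hdropk,
      PySem.List.enumerate_cons]
    simp only [find_chain_outer, find_chain_alt_loop]
    have hinner := find_chain_inner_spec n k hkl k 0 0 (by omega) (by omega) (by omega)
    rw [List.drop_zero] at hinner
    simp only [Nat.cast_zero] at hinner
    have hcond : (2 ≤ (0 : Int) + ((n.toList.take k).countP (fun c => c != n.toList[k]) : Int))
        ↔ (2 ≤ (k : Int) - PySem.Dict.getD d n.toList[k] 0) := by
      rw [hd, countP_ne_eq_sub n.toList k hkl]
      omega
    by_cases hc : 2 ≤ (k : Int) - PySem.Dict.getD d n.toList[k] 0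
    · rw [if_pos hc] at *
      rw [hinner, if_pos (hcond.mpr hc)]
    · rw [if_neg hc]
      rw [hinner, if_neg (fun h => hc (hcond.mp h))]
      have hcast : (k : Int) + 1 = ((k + 1 : Nat) : Int) := by push_cast; ring
      rw [hcast]
      exact ih (k + 1) _ (by omega) (by omega)
        (counter_invariant_step d n.toList k hkl hd)

-- ===== VERDICT (by name: the statement is the Claim_ definition above) =====
theorem find_chain_spec : Claim_equal_find_chain := by
  intro n _
  unfold Spec_find_chain find_chain find_chain_alt
  have h := main_sync n n.toList.length 0 PySem.Dict.empty (by omega) (by omega)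
    (by intro c; simp [PySem.Dict.getD_empty])
  simpa [PySem.Str.len_eq] using h
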